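-- pv_equiv track=rewrite | github.com/kboseong/SegmentationMetric | metric.py | max_precision_operation
-- ===== SOURCE A (Python) =====
-- def max_precision_operation(relation):
--
--     keys = list(relation.keys())
--     keys.sort()
--
--     for i in range (len(keys)):
--         for j in range(i, len(keys)):
--             current_val = relation[keys[i]]
--             temp = relation[keys[j]]
--             if current_val<temp:
--                 relation[keys[i]] = temp
--
--     return relation
-- ===== SOURCE B (Python) =====
-- def max_precision_operation(relation):
--     # One backward pass over the sorted keys keeping a running maximum:
--     # each key gets the max value among keys >= it. Mutates relation in place, like A.
--     m = None
--     for k in sorted(relation.keys(), reverse=True):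
--         v = relation[k]
--         if m is None or v > m:
--             m = v
--         relation[k] = m
--     return relation
-- ===== Notes on version B (the rewrite author's own statement) =====
-- stated objective: faster
-- what changed: replaces the quadratic double loop (for each key, scan all not-smaller keys for its max) by one descending pass over the sorted keys that maintains a running maximum
import Mathlib
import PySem

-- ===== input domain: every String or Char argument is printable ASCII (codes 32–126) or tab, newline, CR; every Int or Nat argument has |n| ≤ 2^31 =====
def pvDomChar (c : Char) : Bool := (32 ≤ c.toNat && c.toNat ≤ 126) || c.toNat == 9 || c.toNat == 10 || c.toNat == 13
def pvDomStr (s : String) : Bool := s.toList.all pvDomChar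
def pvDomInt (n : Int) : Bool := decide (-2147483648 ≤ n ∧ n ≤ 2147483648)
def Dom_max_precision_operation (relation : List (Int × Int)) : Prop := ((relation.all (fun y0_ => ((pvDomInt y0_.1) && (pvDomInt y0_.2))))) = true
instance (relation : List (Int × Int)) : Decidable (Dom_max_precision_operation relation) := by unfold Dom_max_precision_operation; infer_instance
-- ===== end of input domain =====

-- B replaces A's quadratic double scan by one descending pass over the sorted keys with a
-- running maximum; both Pythons mutate the input dict in place and the equivalence proved
-- here is about the returned dict (the mutation is the same).

-- ===== PORT A =====
-- the body of A's inner j-loop (keys[i] is passed in as ki, keys[j] as kj)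
def istep (ki : Int) (d : PySem.Dict Int Int) (kj : Int) : PySem.Dict Int Int :=
  let current_val := d.getD ki 0
  let temp := d.getD kj 0
  if current_val < temp then d.insert ki temp else d

def max_precision_operation (relation : List (Int × Int)) : List (Int × Int) :=
  let d0 := PySem.Dict.ofList relation
  let keys := PySem.List.sorted d0.keys (fun k => k) false
  let d := (PySem.List.pyRange 0 (keys.length : Int) 1).foldl
    (fun d i => (PySem.List.pyRange i (keys.length : Int) 1).foldl
      (fun d j => istep (PySem.List.pyGetD keys i 0) d (PySem.List.pyGetD keys j 0)) d) d0
  d.items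

-- ===== PORT B =====
-- running maximum: Python's  `if m is None or v > m: m = v`
def omax (m : Option Int) (v : Int) : Int :=
  match m with
  | none => v
  | some m => if m < v then v else m

-- the body of B's single loop: state = (dict, running max)
def bstep (p : PySem.Dict Int Int × Option Int) (k : Int) : PySem.Dict Int Int × Option Int :=
  let v := p.1.getD k 0
  let m := omax p.2 v
  (p.1.insert k m, some m)

def max_precision_operation_alt (relation : List (Int × Int)) : List (Int × Int) :=
  let d0 := PySem.Dict.ofList relation
  let p := (PySem.List.sorted d0.keys (fun k => k) true).foldl bstep (d0, (none : Option Int))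
  p.1.items

-- ===== PRECONDITION & SPEC =====
def Spec_max_precision_operation (relation : List (Int × Int)) (out : List (Int × Int)) : Prop := out = max_precision_operation_alt relation
instance (relation : List (Int × Int)) (out : List (Int × Int)) : Decidable (Spec_max_precision_operation relation out) := by unfold Spec_max_precision_operation; infer_instance

-- ===== CLAIM (what is proved, stated in full; the proofs are below) =====
def Claim_equal_max_precision_operation : Prop := ∀ (relation : List (Int × Int)), Dom_max_precision_operation relation → Spec_max_precision_operation relation (max_precision_operation relation)

-- ===== LEMMAS AND PROOFS =====

-- A's outer loop, reformulated on the list of keys (proof-side only)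
def Aloop (d : PySem.Dict Int Int) (ks : List Int) : PySem.Dict Int Int :=
  match ks with
  | [] => d
  | k :: rest => Aloop ((k :: rest).foldl (istep k) d) rest

def listmax (m : Option Int) (vs : List Int) : Option Int :=
  vs.foldl (fun m v => some (omax m v)) m

-- folding A's inner step over a range of indices = folding it over the dropped key list
theorem fold_range_getD {β : Type} (ks : List Int) (g : β → Int → β) :
    ∀ (fuel i : Nat) (d : β), ks.length - i ≤ fuel →
    (PySem.List.pyRange (i : Int) (ks.length : Int) 1).foldl
      (fun d j => g d (PySem.List.pyGetD ks j 0)) d = (ks.drop i).foldl g d := by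
  intro fuel
  induction fuel with
  | zero =>
    intro i d h
    have hge : ks.length ≤ i := by omega
    rw [PySem.List.pyRange_one_eq_nil (by exact_mod_cast hge), List.drop_eq_nil_of_le hge]
    rfl
  | succ n ih =>
    intro i d h
    by_cases hlt : i < ks.length
    · rw [PySem.List.pyRange_one_cons (by exact_mod_cast hlt)]
      have hdrop : ks.drop i = ks[i] :: ks.drop (i + 1) := List.drop_eq_getElem_cons hlt
      have hget : PySem.List.pyGetD ks (i : Int) 0 = ks[i] := by
        rw [PySem.List.pyGetD_natCast, List.getD_eq_getElem?_getD, List.getElem?_eq_getElem hlt]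
        rfl
      rw [hdrop, List.foldl_cons, List.foldl_cons, hget]
      have : ((i : Int) + 1) = ((i + 1 : Nat) : Int) := by push_cast; ring
      rw [this, ih (i + 1) (g d ks[i]) (by omega)]
    · have hge : ks.length ≤ i := by omega
      rw [PySem.List.pyRange_one_eq_nil (by exact_mod_cast hge), List.drop_eq_nil_of_le hge]
      rfl

-- A's double range loop is Aloop over the sorted key list
theorem outer_eq (ks : List Int) :
    ∀ (fuel i : Nat) (d : PySem.Dict Int Int), ks.length - i ≤ fuel →
    (PySem.List.pyRange (i : Int) (ks.length : Int) 1).foldl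
      (fun d ii => (PySem.List.pyRange ii (ks.length : Int) 1).foldl
        (fun d j => istep (PySem.List.pyGetD ks ii 0) d (PySem.List.pyGetD ks j 0)) d) d
    = Aloop d (ks.drop i) := by
  intro fuel
  induction fuel with
  | zero =>
    intro i d h
    have hge : ks.length ≤ i := by omega
    rw [PySem.List.pyRange_one_eq_nil (by exact_mod_cast hge), List.drop_eq_nil_of_le hge]
    rfl
  | succ n ih =>
    intro i d h
    by_cases hlt : i < ks.length
    · rw [PySem.List.pyRange_one_cons (by exact_mod_cast hlt)]
      have hdrop : ks.drop i = ks[i] :: ks.drop (i + 1) := List.drop_eq_getElem_cons hlt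
      have hget : PySem.List.pyGetD ks (i : Int) 0 = ks[i] := by
        rw [PySem.List.pyGetD_natCast, List.getD_eq_getElem?_getD, List.getElem?_eq_getElem hlt]
        rfl
      rw [List.foldl_cons]
      rw [fold_range_getD ks (istep (PySem.List.pyGetD ks (i:Int) 0)) (ks.length) i d (by omega)]
      have hc : ((i : Int) + 1) = ((i + 1 : Nat) : Int) := by push_cast; ring
      rw [hc, ih (i + 1) _ (by omega), hget, hdrop, Aloop]
    · have hge : ks.length ≤ i := by omega
      rw [PySem.List.pyRange_one_eq_nil (by exact_mod_cast hge), List.drop_eq_nil_of_le hge]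
      rfl

theorem istep_eq (ki : Int) (d : PySem.Dict Int Int) (kj : Int) :
    istep ki d kj = if d.getD ki 0 < d.getD kj 0 then d.insert ki (d.getD kj 0) else d := rfl

theorem inner_spec (ki : Int) (os : List Int) :
    ∀ (d : PySem.Dict Int Int), ki ∈ d.keys → ki ∉ os →
    ((os.foldl (istep ki) d).keys = d.keys ∧
     (os.foldl (istep ki) d).get? ki
       = some ((os.map (fun x => d.getD x 0)).foldl max (d.getD ki 0)) ∧
     ∀ k, k ≠ ki → (os.foldl (istep ki) d).get? k = d.get? k) := by
  induction os with
  | nil =>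
    intro d hk _
    refine ⟨rfl, ?_, fun _ _ => rfl⟩
    simp only [List.map_nil, List.foldl_nil]
    cases hg : d.get? ki with
    | none => exact absurd ((PySem.Dict.get?_eq_none_iff_not_mem_keys d ki).mp hg) (by simpa using hk)
    | some v => rw [PySem.Dict.getD_of_get?_eq_some d 0 hg]
  | cons o os ih =>
    intro d hk hnin
    have hone : o ≠ ki := fun h => hnin (h ▸ List.mem_cons_self ..)
    have hnin' : ki ∉ os := fun h => hnin (List.mem_cons_of_mem _ h)
    have hcont : d.contains ki = true := (PySem.Dict.contains_iff_mem_keys d ki).mpr hk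
    -- facts about the one step
    have hkeys1 : (istep ki d o).keys = d.keys := by
      rw [istep_eq]
      split
      · exact PySem.Dict.keys_insert_of_contains d _ hcont
      · rfl
    have hgki1 : (istep ki d o).getD ki 0 = max (d.getD ki 0) (d.getD o 0) := by
      rw [istep_eq]
      split
      · rw [PySem.Dict.getD_insert]; simp; omega
      · simp; omega
    have hgo1 : ∀ x, x ≠ ki → (istep ki d o).getD x 0 = d.getD x 0 := by
      intro x hx
      rw [istep_eq]
      split
      · rw [PySem.Dict.getD_insert]; simp [hx]
      · rfl
    have hq1 : ∀ k, k ≠ ki → (istep ki d o).get? k = d.get? k := by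
      intro k hkne
      rw [istep_eq]
      split
      · rw [PySem.Dict.get?_insert]; simp [hkne]
      · rfl
    have hk1 : ki ∈ (istep ki d o).keys := hkeys1 ▸ hk
    obtain ⟨ih1, ih2, ih3⟩ := ih (istep ki d o) hk1 hnin'
    refine ⟨by rw [List.foldl_cons, ih1, hkeys1], ?_, ?_⟩
    · rw [List.foldl_cons, ih2]
      have hmap : os.map (fun x => (istep ki d o).getD x 0) = os.map (fun x => d.getD x 0) := by
        apply List.map_congr_left
        intro x hx
        exact hgo1 x (fun h => hnin' (h ▸ hx))
      rw [hmap, hgki1]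
      simp only [List.map_cons, List.foldl_cons]
    · intro k hkne
      rw [List.foldl_cons, ih3 k hkne, hq1 k hkne]

theorem Aloop_spec (ks : List Int) :
    ∀ (d : PySem.Dict Int Int), ks.Pairwise (· < ·) → (∀ k ∈ ks, k ∈ d.keys) →
    ((Aloop d ks).keys = d.keys ∧
     ∀ k, (Aloop d ks).get? k =
       if k ∈ ks then
         some (((ks.filter (fun x => decide (k < x))).map (fun x => d.getD x 0)).foldl max (d.getD k 0))
       else d.get? k) := by
  induction ks with
  | nil => intro d _ _; exact ⟨rfl, fun k => by simp [Aloop]⟩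
  | cons k rest ih =>
    intro d hpw hsub
    have hkrest : ∀ x ∈ rest, k < x := (List.pairwise_cons.mp hpw).1
    have hpw' : rest.Pairwise (· < ·) := (List.pairwise_cons.mp hpw).2
    have hknin : k ∉ rest := fun h => lt_irrefl k (hkrest k h)
    have hkd : k ∈ d.keys := hsub k (List.mem_cons_self ..)
    -- the first inner iteration (j = i) is a no-op
    have hstep0 : istep k d k = d := by rw [istep_eq]; simp
    have hA : Aloop d (k :: rest) = Aloop (rest.foldl (istep k) d) rest := by
      rw [Aloop, List.foldl_cons, hstep0]
    obtain ⟨i1, i2, i3⟩ := inner_spec k rest d hkd hknin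
    set d1 := rest.foldl (istep k) d with hd1
    have hgd1 : ∀ x, x ≠ k → d1.getD x 0 = d.getD x 0 := by
      intro x hx
      rw [PySem.Dict.getD_eq_get?_getD, i3 x hx, ← PySem.Dict.getD_eq_get?_getD]
    obtain ⟨a1, a2⟩ := ih d1 hpw' (fun x hx => i1 ▸ hsub x (List.mem_cons_of_mem _ hx))
    rw [hA]
    refine ⟨a1.trans i1, ?_⟩
    intro k0
    by_cases hk0 : k0 = k
    · subst hk0
      rw [a2 k0, if_neg hknin, i2, if_pos (List.mem_cons_self ..)]
      congr 1
      have hf : (k0 :: rest).filter (fun x => decide (k0 < x)) = rest := by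
        rw [List.filter_cons]
        simp only [lt_irrefl, decide_false]
        exact List.filter_eq_self.mpr (fun x hx => by simpa using hkrest x hx)
      rw [hf]
    · by_cases hmem : k0 ∈ rest
      · have hlt : k < k0 := hkrest k0 hmem
        rw [a2 k0, if_pos hmem, if_pos (List.mem_cons_of_mem _ hmem)]
        congr 1
        have hf : (k :: rest).filter (fun x => decide (k0 < x)) = rest.filter (fun x => decide (k0 < x)) := by
          rw [List.filter_cons]
          simp [not_lt.mpr (le_of_lt hlt)]
        rw [hf]
        have hmap : (rest.filter (fun x => decide (k0 < x))).map (fun x => d1.getD x 0)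
            = (rest.filter (fun x => decide (k0 < x))).map (fun x => d.getD x 0) := by
          apply List.map_congr_left
          intro x hx
          exact hgd1 x (fun h => hknin (h ▸ List.mem_of_mem_filter hx))
        rw [hmap, hgd1 k0 hk0]
      · have hnm : k0 ∉ k :: rest := by simp [hk0, hmem]
        rw [a2 k0, if_neg hmem, if_neg hnm, i3 k0 hk0]

theorem Bfold_spec (ds : List Int) :
    ∀ (d : PySem.Dict Int Int) (m : Option Int), ds.Pairwise (· > ·) → (∀ k ∈ ds, k ∈ d.keys) →
    (((ds.foldl bstep (d, m)).1.keys = d.keys) ∧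
     ∀ k, (ds.foldl bstep (d, m)).1.get? k =
       if k ∈ ds then
         some (omax (listmax m ((ds.filter (fun x => decide (k < x))).map (fun x => d.getD x 0)))
                 (d.getD k 0))
       else d.get? k) := by
  induction ds with
  | nil => intro d m _ _; exact ⟨rfl, fun k => by simp⟩
  | cons k rest ih =>
    intro d m hpw hsub
    have hkrest : ∀ x ∈ rest, x < k := (List.pairwise_cons.mp hpw).1
    have hpw' : rest.Pairwise (· > ·) := (List.pairwise_cons.mp hpw).2
    have hknin : k ∉ rest := fun h => lt_irrefl k (hkrest k h)
    have hkd : k ∈ d.keys := hsub k (List.mem_cons_self ..)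
    have hcont : d.contains k = true := (PySem.Dict.contains_iff_mem_keys d k).mpr hkd
    have hstep : (k :: rest).foldl bstep (d, m)
        = rest.foldl bstep (d.insert k (omax m (d.getD k 0)), some (omax m (d.getD k 0))) := rfl
    set w := omax m (d.getD k 0) with hw
    set d1 := d.insert k w with hd1
    have hkeys1 : d1.keys = d.keys := PySem.Dict.keys_insert_of_contains d w hcont
    have hgd1 : ∀ x, x ≠ k → d1.getD x 0 = d.getD x 0 := by
      intro x hx
      rw [hd1, PySem.Dict.getD_insert]
      simp [hx]
    have hq1 : ∀ x, x ≠ k → d1.get? x = d.get? x := by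
      intro x hx
      rw [hd1, PySem.Dict.get?_insert]
      simp [hx]
    obtain ⟨b1, b2⟩ := ih d1 (some w) hpw' (fun x hx => hkeys1 ▸ hsub x (List.mem_cons_of_mem _ hx))
    rw [hstep]
    refine ⟨b1.trans hkeys1, ?_⟩
    intro k0
    by_cases hk0 : k0 = k
    · subst hk0
      rw [b2 k0, if_neg hknin, if_pos (List.mem_cons_self ..)]
      have hf : (k0 :: rest).filter (fun x => decide (k0 < x)) = [] := by
        apply List.filter_eq_nil_iff.mpr
        intro x hx
        rcases List.mem_cons.mp hx with h | h
        · simp [h]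
        · simpa using not_lt.mpr (le_of_lt (hkrest x h))
      rw [hf, hd1, PySem.Dict.get?_insert]
      simp only [listmax, List.map_nil, List.foldl_nil, if_true, hw]
    · by_cases hmem : k0 ∈ rest
      · have hlt : k0 < k := hkrest k0 hmem
        rw [b2 k0, if_pos hmem, if_pos (List.mem_cons_of_mem _ hmem)]
        have hf : (k :: rest).filter (fun x => decide (k0 < x))
            = k :: rest.filter (fun x => decide (k0 < x)) := by
          rw [List.filter_cons, if_pos (by simpa using hlt)]
        rw [hf]
        have hmap : (rest.filter (fun x => decide (k0 < x))).map (fun x => d1.getD x 0)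
            = (rest.filter (fun x => decide (k0 < x))).map (fun x => d.getD x 0) := by
          apply List.map_congr_left
          intro x hx
          exact hgd1 x (fun h => hknin (h ▸ List.mem_of_mem_filter hx))
        rw [hmap, hgd1 k0 hk0]
        have hlm : listmax m ((k :: rest.filter (fun x => decide (k0 < x))).map (fun x => d.getD x 0))
            = listmax (some w) ((rest.filter (fun x => decide (k0 < x))).map (fun x => d.getD x 0)) := rfl
        rw [hlm]
      · have hnm : k0 ∉ k :: rest := by simp [hk0, hmem]
        rw [b2 k0, if_neg hmem, if_neg hnm, hq1 k0 hk0]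

theorem foldl_max_pull (vs : List Int) : ∀ (x v : Int), vs.foldl max (max x v) = max (vs.foldl max x) v := by
  induction vs with
  | nil => intro x v; rfl
  | cons w vs ih =>
    intro x v
    simp only [List.foldl_cons]
    rw [show max (max x v) w = max (max x w) v by omega, ih]

theorem foldl_max_reverse (vs : List Int) : ∀ (x : Int), vs.reverse.foldl max x = vs.foldl max x := by
  induction vs with
  | nil => intro x; rfl
  | cons v vs ih =>
    intro x
    simp only [List.reverse_cons, List.foldl_append, List.foldl_cons, List.foldl_nil, ih]
    rw [← foldl_max_pull, show max x v = max x v from rfl]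

theorem omax_listmax_some (vs : List Int) : ∀ (a x : Int), omax (listmax (some a) vs) x = vs.foldl max (max a x) := by
  induction vs with
  | nil => intro a x; simp [listmax, omax, max_def]; omega
  | cons v vs ih =>
    intro a x
    have h1 : listmax (some a) (v :: vs) = listmax (some (omax (some a) v)) vs := rfl
    rw [h1, ih]
    simp only [List.foldl_cons]
    have : omax (some a) v = max a v := by simp [omax, max_def]; omega
    rw [this, show max (max a v) x = max (max a x) v by omega, foldl_max_pull]

theorem omax_listmax_none (vs : List Int) (x : Int) : omax (listmax none vs) x = vs.foldl max x := by
  cases vs with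
  | nil => rfl
  | cons v vs =>
    have h1 : listmax none (v :: vs) = listmax (some (omax none v)) vs := rfl
    rw [h1, omax_listmax_some]
    simp only [omax, List.foldl_cons]
    rw [show max v x = max x v by omega]

theorem items_eq_map_keys (d : PySem.Dict Int Int) (h : d.keys.Nodup) :
    d.items = d.keys.map (fun k => (k, d.getD k 0)) := by
  obtain ⟨l⟩ := d
  induction l with
  | nil => rfl
  | cons p rest ih =>
    obtain ⟨k, v⟩ := p
    rw [PySem.Dict.keys_mk] at h
    simp only [List.map_cons, List.nodup_cons] at h
    have hhd : (PySem.Dict.mk ((k, v) :: rest)).getD k 0 = v := by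
      rw [PySem.Dict.getD_eq_get?_getD, PySem.Dict.get?_mk_cons]
      simp
    have htl : ∀ k' ∈ rest.map (fun x => x.1),
        (PySem.Dict.mk ((k, v) :: rest)).getD k' 0 = (PySem.Dict.mk rest).getD k' 0 := by
      intro k' hk'
      have hne : k ≠ k' := fun he => h.1 (he ▸ hk')
      rw [PySem.Dict.getD_eq_get?_getD, PySem.Dict.get?_mk_cons, if_neg (by simpa using hne),
        ← PySem.Dict.getD_eq_get?_getD]
    show (k, v) :: rest = ((PySem.Dict.mk ((k, v) :: rest)).keys).map
      (fun k' => (k', (PySem.Dict.mk ((k, v) :: rest)).getD k' 0))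
    rw [PySem.Dict.keys_mk, List.map_cons, List.map_cons, hhd]
    congr 1
    rw [List.map_congr_left (fun k' hk' => by simp only []; rw [htl k' hk'] :
      ∀ k' ∈ rest.map (fun x => x.1), (fun k' => (k', (PySem.Dict.mk ((k, v) :: rest)).getD k' 0)) k'
        = (fun k' => (k', (PySem.Dict.mk rest).getD k' 0)) k')]
    have := ih h.2
    rw [PySem.Dict.keys_mk] at this
    exact this

-- ===== VERDICT (by name: the statement is the Claim_ definition above) =====
theorem max_precision_operation_spec : Claim_equal_max_precision_operation := by
  intro relation _
  unfold Spec_max_precision_operation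
  simp only [max_precision_operation, max_precision_operation_alt]
  set d0 := PySem.Dict.ofList relation with hd0
  set asc := PySem.List.sorted d0.keys (fun k => k) false with hasc
  have hnd : d0.keys.Nodup := PySem.Dict.nodup_keys_ofList relation
  have hascnd : asc.Nodup := ((PySem.List.sorted_perm d0.keys (fun k => k) false).nodup_iff).mpr hnd
  have hple : asc.Pairwise (fun a b => a ≤ b) := PySem.List.sorted_pairwise d0.keys (fun k => k)
  have hplt : asc.Pairwise (· < ·) :=
    (hple.and hascnd).imp (fun h => lt_of_le_of_ne h.1 h.2)
  have hsub : ∀ k ∈ asc, k ∈ d0.keys := fun k hk => (PySem.List.mem_sorted _ _ _ _).mp hk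
  have hdesc : PySem.List.sorted d0.keys (fun k => k) true = asc.reverse :=
    PySem.List.sorted_rev_eq_of_perm_of_pairwise_gt _ _ _
      (asc.reverse_perm.trans (PySem.List.sorted_perm d0.keys (fun k => k) false))
      (List.pairwise_reverse.mpr hplt)
  have houter : (PySem.List.pyRange 0 (asc.length : Int) 1).foldl
      (fun d i => (PySem.List.pyRange i (asc.length : Int) 1).foldl
        (fun d j => istep (PySem.List.pyGetD asc i 0) d (PySem.List.pyGetD asc j 0)) d) d0
      = Aloop d0 asc := by
    have h := outer_eq asc asc.length 0 d0 (by omega)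
    rw [List.drop_zero] at h
    exact_mod_cast h
  rw [hdesc, houter]
  obtain ⟨ka, va⟩ := Aloop_spec asc d0 hplt hsub
  obtain ⟨kb, vb⟩ := Bfold_spec asc.reverse d0 none (List.pairwise_reverse.mpr hplt)
    (fun k hk => hsub k (List.mem_reverse.mp hk))
  rw [items_eq_map_keys _ (ka.symm ▸ hnd), items_eq_map_keys _ (kb.symm ▸ hnd), ka, kb]
  apply List.map_congr_left
  intro k hk
  have hmem : k ∈ asc := (PySem.List.mem_sorted _ _ _ _).mpr hk
  have hmemr : k ∈ asc.reverse := List.mem_reverse.mpr hmem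
  rw [PySem.Dict.getD_eq_get?_getD, PySem.Dict.getD_eq_get?_getD, va k, vb k,
    if_pos hmem, if_pos hmemr]
  rw [List.filter_reverse, List.map_reverse, omax_listmax_none, foldl_max_reverse]
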